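-- pv_equiv track=rewrite | github.com/MLjungg/ID2222-Data-Mining | Lab 2 - Discovery of Frequent Itemsets and Association Rules /main.py | higher_order_validation
-- ===== SOURCE A (Python) =====
-- def higher_order_validation(itemset, n):
--     # This function check if the new itemset can be constructed from the current itemset --> eg. to create the triple [1,2,3] the following pairs most exist: [1,2], [2,3], [1,3]
--     valid_itemset = True
--     singletons = []
--     for items in itemset:
--         for singleton in items:
--             singletons.append(singleton)
--     set_singletons = set(singletons)
--     for singleton in set_singletons:
--         if singletons.count(
--                 singleton) != n - 1:  # E.g for the triple [1,2,3] to be valid each singleton needs to exist 3-1 times.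
--             valid_itemset = False
--             break
--
--     if valid_itemset:
--         return valid_itemset, set_singletons
--     else:
--         return valid_itemset, []
-- ===== SOURCE B (Python) =====
-- def higher_order_validation(itemset, n):
--     # Sort the flattened singletons once and check run lengths in a single scan,
--     # instead of calling list.count for every distinct singleton.
--     singletons = [s for items in itemset for s in items]
--     srt = sorted(singletons)
--     i = 0
--     m = len(srt)
--     while i < m:
--         j = i
--         while j < m and srt[j] == srt[i]:
--             j += 1
--         if j - i != n - 1:
--             return False, []
--         i = j
--     return True, set(singletons)
-- ===== Notes on version B (the rewrite author's own statement) =====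
-- stated objective: alternative
-- what changed: Replaces the per-distinct-element list.count scans with one sort of the flattened singletons followed by a single run-length scan.
import Mathlib
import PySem

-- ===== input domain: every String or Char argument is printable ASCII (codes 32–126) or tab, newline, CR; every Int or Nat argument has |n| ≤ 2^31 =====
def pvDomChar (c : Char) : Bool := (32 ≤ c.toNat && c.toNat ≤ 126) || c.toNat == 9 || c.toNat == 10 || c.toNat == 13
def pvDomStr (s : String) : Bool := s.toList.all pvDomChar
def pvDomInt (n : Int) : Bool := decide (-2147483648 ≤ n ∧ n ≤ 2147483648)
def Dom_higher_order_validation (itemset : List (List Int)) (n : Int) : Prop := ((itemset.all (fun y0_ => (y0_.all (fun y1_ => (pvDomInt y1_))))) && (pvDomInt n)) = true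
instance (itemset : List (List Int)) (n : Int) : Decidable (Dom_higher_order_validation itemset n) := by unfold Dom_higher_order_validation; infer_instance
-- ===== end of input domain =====

-- B changes the counting strategy: one sort of the flattened singletons plus a single
-- run-length scan, instead of a list.count scan per distinct singleton (objective: alternative).

-- ===== PORT A =====
-- A's loop over the distinct singletons: break (return false) at the first one whose count ≠ n-1
def pvLoopA (sets : List Int) (singles : List Int) (n : Int) : Bool :=
  match sets with
  | [] => true
  | s :: rest => if ((singles.count s : Int) ≠ n - 1) then false else pvLoopA rest singles n

def higher_order_validation (itemset : List (List Int)) (n : Int) : Bool × List Int :=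
  let singletons := itemset.foldl (fun acc items => items.foldl (fun a s => a ++ [s]) acc) []
  let set_singletons := PySem.Set.ofList singletons
  let valid_itemset := pvLoopA set_singletons singletons n
  if valid_itemset then (valid_itemset, set_singletons) else (valid_itemset, [])

-- ===== PORT B =====
-- B's outer while-loop: the inner while advances j over the run of elements equal to srt[i]
-- (takeWhile/dropWhile is that run split); return false as soon as a run length ≠ n-1.
def pvCheckRuns (l : List Int) (n : Int) : Bool :=
  match l with
  | [] => true
  | x :: xs =>
    if ((1 + (xs.takeWhile (fun y => y == x)).length : Int) ≠ n - 1) then false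
    else pvCheckRuns (xs.dropWhile (fun y => y == x)) n
termination_by l.length
decreasing_by
  simp only [List.length_cons]
  have := List.length_dropWhile_le (fun y => y == x) xs
  omega

def higher_order_validation_alt (itemset : List (List Int)) (n : Int) : Bool × List Int :=
  let singletons := itemset.flatMap (fun items => items)
  let srt := PySem.List.sorted singletons (fun x => x) false
  if pvCheckRuns srt n then (true, PySem.Set.ofList singletons) else (false, [])

-- ===== PRECONDITION & SPEC =====
def Spec_higher_order_validation (itemset : List (List Int)) (n : Int) (out : Bool × List Int) : Prop := out = higher_order_validation_alt itemset n
instance (itemset : List (List Int)) (n : Int) (out : Bool × List Int) : Decidable (Spec_higher_order_validation itemset n out) := by unfold Spec_higher_order_validation; infer_instance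

-- ===== CLAIM (what is proved, stated in full; the proofs are below) =====
def Claim_equal_higher_order_validation : Prop := ∀ (itemset : List (List Int)) (n : Int), Dom_higher_order_validation itemset n → Spec_higher_order_validation itemset n (higher_order_validation itemset n)

-- ===== LEMMAS AND PROOFS =====

-- A's flatten (nested append loop) equals flatMap
theorem pvFoldAppend (items : List Int) (acc : List Int) :
    items.foldl (fun a s => a ++ [s]) acc = acc ++ items := by
  induction items generalizing acc with
  | nil => simp
  | cons x xs ih => simp [List.foldl, ih]

theorem pvFlattenEq (itemset : List (List Int)) :
    itemset.foldl (fun acc items => items.foldl (fun a s => a ++ [s]) acc) [] =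
      itemset.flatMap (fun items => items) := by
  have h : ∀ (l : List (List Int)) (acc : List Int),
      l.foldl (fun acc items => items.foldl (fun a s => a ++ [s]) acc) acc =
        acc ++ l.flatMap (fun items => items) := by
    intro l
    induction l with
    | nil => intro acc; simp
    | cons x xs ih =>
      intro acc
      rw [List.foldl_cons, pvFoldAppend, ih]
      simp
  simpa using h itemset []

-- A's loop is the 'all' of the count condition
theorem pvLoopA_eq_all (sets singles : List Int) (n : Int) :
    pvLoopA sets singles n = sets.all (fun s => decide ((singles.count s : Int) = n - 1)) := by
  induction sets with
  | nil => rfl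
  | cons s rest ih =>
    by_cases h : ((singles.count s : Int) = n - 1) <;> simp [pvLoopA, h, ih]

theorem pvDropWhile_gt (x : Int) (xs : List Int) (hp : xs.Pairwise (· ≤ ·))
    (hge : ∀ y ∈ xs, x ≤ y) :
    ∀ y ∈ xs.dropWhile (fun y => y == x), x < y := by
  induction xs with
  | nil => simp
  | cons a t ih =>
    by_cases ha : a = x
    · have hb : (a == x) = true := by simp [ha]
      simp only [List.dropWhile_cons, hb, if_true]
      exact ih hp.of_cons (fun y hy => hge y (List.mem_cons_of_mem _ hy))
    · have hxa : x < a := lt_of_le_of_ne (hge a (List.mem_cons_self)) (Ne.symm ha)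
      have hb : (a == x) = false := by simp [ha]
      simp only [List.dropWhile_cons, hb, if_false, Bool.false_eq_true]
      intro y hy
      rcases List.mem_cons.mp hy with rfl | hy
      · exact hxa
      · exact lt_of_lt_of_le hxa ((List.pairwise_cons.mp hp).1 y hy)

-- counts in x::xs, expressed through the run split, when x::xs is sorted
theorem pvCounts (x : Int) (xs : List Int) (hp : (x :: xs).Pairwise (· ≤ ·)) :
    (x :: xs).count x = 1 + (xs.takeWhile (fun y => y == x)).length ∧
      ∀ s ∈ xs.dropWhile (fun y => y == x),
        (x :: xs).count s = (xs.dropWhile (fun y => y == x)).count s := by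
  have hsplit : xs.takeWhile (fun y => y == x) ++ xs.dropWhile (fun y => y == x) = xs :=
    List.takeWhile_append_dropWhile
  have hge : ∀ y ∈ xs, x ≤ y := fun y hy => (List.pairwise_cons.mp hp).1 y hy
  have hgt := pvDropWhile_gt x xs hp.of_cons hge
  have hrun : ∀ y ∈ xs.takeWhile (fun y => y == x), y = x := by
    intro y hy
    simpa using List.mem_takeWhile_imp hy
  constructor
  · have hxs : xs.count x = (xs.takeWhile (fun y => y == x)).length := by
      conv_lhs => rw [← hsplit]
      rw [List.count_append]
      have h1 : (xs.takeWhile (fun y => y == x)).count x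
          = (xs.takeWhile (fun y => y == x)).length :=
        List.count_eq_length.mpr (fun y hy => by simp [hrun y hy])
      have h2 : (xs.dropWhile (fun y => y == x)).count x = 0 :=
        List.count_eq_zero.mpr (fun h => absurd rfl (ne_of_gt (hgt x h)))
      omega
    rw [List.count_cons_self, hxs]
    omega
  · intro s hs
    have hxs : x ≠ s := ne_of_lt (hgt s hs)
    have hb : (x == s) = false := by simp [hxs]
    rw [List.count_cons, hb]
    simp only [if_false, Bool.false_eq_true, add_zero]
    conv_lhs => rw [← hsplit]
    rw [List.count_append]
    have h1 : (xs.takeWhile (fun y => y == x)).count s = 0 :=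
      List.count_eq_zero.mpr (fun h => hxs ((hrun s h).symm))
    omega

-- the main characterisation: on a sorted list, the run-length check equals the count condition
theorem pvCheckRuns_iff (l : List Int) (n : Int) (hp : l.Pairwise (· ≤ ·)) :
    pvCheckRuns l n = true ↔ ∀ s ∈ l, ((l.count s : Int) = n - 1) := by
  induction l using pvCheckRuns.induct n with
  | case1 => simp [pvCheckRuns]
  | case2 x xs hbad =>
    rw [pvCheckRuns, if_pos hbad]
    have hcnt := (pvCounts x xs hp).1
    constructor
    · intro h; exact absurd h (by simp)
    · intro h
      have := h x List.mem_cons_self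
      rw [hcnt] at this
      exact absurd (by push_cast at this ⊢; omega) hbad
  | case3 x xs hok ih =>
    rw [pvCheckRuns, if_neg hok]
    obtain ⟨hcnt, hcnt_tail⟩ := pvCounts x xs hp
    have hsplit : xs.takeWhile (fun y => y == x) ++ xs.dropWhile (fun y => y == x) = xs :=
      List.takeWhile_append_dropWhile
    have hrun : ∀ y ∈ xs.takeWhile (fun y => y == x), y = x := by
      intro y hy
      simpa using List.mem_takeWhile_imp hy
    have hpd : (xs.dropWhile (fun y => y == x)).Pairwise (· ≤ ·) :=
      hp.of_cons.sublist (List.dropWhile_sublist _)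
    have hx_ok : ((x :: xs).count x : Int) = n - 1 := by
      rw [hcnt]
      push_cast
      push Not at hok
      omega
    rw [ih hpd]
    constructor
    · intro h s hs
      rcases List.mem_cons.mp hs with rfl | hs
      · exact hx_ok
      · rw [← hsplit] at hs
        rcases List.mem_append.mp hs with hs | hs
        · rw [hrun s hs]; exact hx_ok
        · rw [hcnt_tail s hs]
          exact_mod_cast h s hs
    · intro h s hs
      have hmem : s ∈ x :: xs :=
        List.mem_cons_of_mem _ (hsplit ▸ List.mem_append_right _ hs)
      have := h s hmem
      rw [hcnt_tail s hs] at this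
      exact this

-- the two validity booleans agree
theorem pvBools (singles : List Int) (n : Int) :
    pvLoopA (PySem.Set.ofList singles) singles n =
      pvCheckRuns (PySem.List.sorted singles (fun x => x) false) n := by
  set srt := PySem.List.sorted singles (fun x => x) false with hsrt
  have hperm : srt.Perm singles := PySem.List.sorted_perm ..
  have hpair : srt.Pairwise (· ≤ ·) := by
    simpa using PySem.List.sorted_pairwise singles (fun x => x)
  have hA : pvLoopA (PySem.Set.ofList singles) singles n = true ↔
      ∀ s ∈ singles, ((singles.count s : Int) = n - 1) := by
    rw [pvLoopA_eq_all]
    simp only [List.all_eq_true, decide_eq_true_eq, PySem.Set.mem_ofList]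
  have hB : pvCheckRuns srt n = true ↔
      ∀ s ∈ singles, ((singles.count s : Int) = n - 1) := by
    rw [pvCheckRuns_iff srt n hpair]
    constructor
    · intro h s hs
      have := h s (hperm.mem_iff.mpr hs)
      rwa [hperm.count_eq] at this
    · intro h s hs
      rw [hperm.count_eq]
      exact h s (hperm.mem_iff.mp hs)
  rw [Bool.eq_iff_iff]
  exact hA.trans hB.symm

-- ===== VERDICT (by name: the statement is the Claim_ definition above) =====
theorem higher_order_validation_spec : Claim_equal_higher_order_validation := by
  intro itemset n _
  unfold Spec_higher_order_validation higher_order_validation higher_order_validation_alt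
  simp only [pvFlattenEq]
  rw [← pvBools (itemset.flatMap (fun items => items)) n]
  cases h : pvLoopA (PySem.Set.ofList (itemset.flatMap (fun items => items)))
      (itemset.flatMap (fun items => items)) n <;> simp
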